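-- pv_equiv track=rewrite | github.com/i-am-SangWoo-Lee/MIT-6.00-INTRODUCTION-TO-COMPUTER-SCIENCE-AND-PROGRAMMING | ProblemSet03/ps3c.py | constrainedMatchPair
-- ===== SOURCE A (Python) =====
-- def constrainedMatchPair(firstMatch:tuple, secondMatch:tuple, length:int):
--     """
--     Takes two tuple arguments and one integer arguments, 'firstMatch', 'secondMatch', 'length'.\n
--     Returns index that satisfying\n
--     'index of first match(part of key)' + 'length of key' = 'index of second match(part of key)'\n
--     this formula in form of tuple.
--     """
--     ans = []
--     if len(firstMatch) == 0:
--         return tuple(secondMatch)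
--     elif len(secondMatch) == 0:
--         return tuple(firstMatch)
--     else:
--         for i in firstMatch:
--             for j in secondMatch:
--                 if int(i) + length + 1 == int(j):
--                     ans.append(i)
--         return tuple(ans)
-- ===== SOURCE B (Python) =====
-- def _bisect_left(a, x):
--     lo, hi = 0, len(a)
--     while lo < hi:
--         mid = (lo + hi) // 2
--         if a[mid] < x:
--             lo = mid + 1
--         else:
--             hi = mid
--     return lo
--
--
-- def _bisect_right(a, x):
--     lo, hi = 0, len(a)
--     while lo < hi:
--         mid = (lo + hi) // 2
--         if x < a[mid]:
--             hi = mid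
--         else:
--             lo = mid + 1
--     return lo
--
--
-- def constrainedMatchPair(firstMatch: tuple, secondMatch: tuple, length: int):
--     if len(firstMatch) == 0:
--         return tuple(secondMatch)
--     if len(secondMatch) == 0:
--         return tuple(firstMatch)
--     snd = sorted(int(j) for j in secondMatch)
--     ans = []
--     for i in firstMatch:
--         t = int(i) + length + 1
--         ans.extend([i] * (_bisect_right(snd, t) - _bisect_left(snd, t)))
--     return tuple(ans)
-- ===== Notes on version B (the rewrite author's own statement) =====
-- stated objective: faster
-- what changed: Replaces A's nested quadratic scan with sort-then-binary-search: secondMatch is sorted once and each firstMatch element's multiplicity is found as bisect_right - bisect_left (hand-written binary searches), emitted with list repetition.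
import Mathlib
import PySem

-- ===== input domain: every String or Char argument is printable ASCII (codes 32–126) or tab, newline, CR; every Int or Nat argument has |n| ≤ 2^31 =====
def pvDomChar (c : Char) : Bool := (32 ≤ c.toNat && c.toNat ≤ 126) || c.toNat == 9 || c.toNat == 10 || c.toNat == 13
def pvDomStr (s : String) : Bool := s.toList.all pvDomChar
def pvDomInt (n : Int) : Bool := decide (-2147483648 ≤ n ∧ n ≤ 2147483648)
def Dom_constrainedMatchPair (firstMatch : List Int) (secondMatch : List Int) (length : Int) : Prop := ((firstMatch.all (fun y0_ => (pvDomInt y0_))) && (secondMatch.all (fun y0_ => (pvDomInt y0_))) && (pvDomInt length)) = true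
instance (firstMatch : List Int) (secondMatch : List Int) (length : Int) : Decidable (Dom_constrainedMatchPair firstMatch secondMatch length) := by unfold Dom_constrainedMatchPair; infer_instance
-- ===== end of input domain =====

-- B replaces A's nested scan by sorting secondMatch once and answering each firstMatch element
-- with two hand-written binary searches (faster in a timing run).

-- ===== PORT A =====
def constrainedMatchPair (firstMatch : List Int) (secondMatch : List Int) (length : Int) : List Int :=
  if firstMatch.length = 0 then secondMatch
  else if secondMatch.length = 0 then firstMatch
  else
    firstMatch.foldl (fun ans i =>
      secondMatch.foldl (fun ans j => if i + length + 1 = j then ans ++ [i] else ans) ans) []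

-- ===== PORT B =====
-- Source B's hand-written while-loops, as fuel recursion (fuel = list length bounds the
-- halving loop; the 'none' branch is an unreachable totality guard for the index).
def pvBisectLeftGo (a : List Int) (x : Int) : Nat → Nat → Nat → Nat
  | 0, lo, _ => lo
  | fuel + 1, lo, hi =>
    if lo < hi then
      match a[(lo + hi) / 2]? with
      | some y => if y < x then pvBisectLeftGo a x fuel ((lo + hi) / 2 + 1) hi
                  else pvBisectLeftGo a x fuel lo ((lo + hi) / 2)
      | none => lo
    else lo

def pvBisectLeft (a : List Int) (x : Int) : Nat := pvBisectLeftGo a x a.length 0 a.length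

def pvBisectRightGo (a : List Int) (x : Int) : Nat → Nat → Nat → Nat
  | 0, lo, _ => lo
  | fuel + 1, lo, hi =>
    if lo < hi then
      match a[(lo + hi) / 2]? with
      | some y => if x < y then pvBisectRightGo a x fuel lo ((lo + hi) / 2)
                  else pvBisectRightGo a x fuel ((lo + hi) / 2 + 1) hi
      | none => lo
    else lo

def pvBisectRight (a : List Int) (x : Int) : Nat := pvBisectRightGo a x a.length 0 a.length

def constrainedMatchPair_alt (firstMatch : List Int) (secondMatch : List Int) (length : Int) : List Int :=
  if firstMatch.length = 0 then secondMatch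
  else if secondMatch.length = 0 then firstMatch
  else
    let snd := PySem.List.sorted secondMatch (fun j => j) false
    firstMatch.foldl (fun ans i =>
      let t := i + length + 1
      ans ++ List.replicate (pvBisectRight snd t - pvBisectLeft snd t) i) []

-- ===== PRECONDITION & SPEC =====
def Spec_constrainedMatchPair (firstMatch : List Int) (secondMatch : List Int) (length : Int) (out : List Int) : Prop := out = constrainedMatchPair_alt firstMatch secondMatch length
instance (firstMatch : List Int) (secondMatch : List Int) (length : Int) (out : List Int) : Decidable (Spec_constrainedMatchPair firstMatch secondMatch length out) := by unfold Spec_constrainedMatchPair; infer_instance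

-- ===== CLAIM (what is proved, stated in full; the proofs are below) =====
def Claim_equal_constrainedMatchPair : Prop := ∀ (firstMatch : List Int) (secondMatch : List Int) (length : Int), Dom_constrainedMatchPair firstMatch secondMatch length → Spec_constrainedMatchPair firstMatch secondMatch length (constrainedMatchPair firstMatch secondMatch length)

-- ===== LEMMAS AND PROOFS =====

-- my fuel loops are exactly PySem's bisect loops
theorem pvBisectLeftGo_eq (a : List Int) (x : Int) :
    ∀ fuel lo hi, pvBisectLeftGo a x fuel lo hi = PySem.List.bisectLeftLoop a x fuel lo hi := by
  intro fuel
  induction fuel with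
  | zero => intro lo hi; simp [pvBisectLeftGo, PySem.List.bisectLeftLoop]
  | succ n ih =>
    intro lo hi
    simp only [pvBisectLeftGo, PySem.List.bisectLeftLoop]
    split_ifs with h
    · cases a[(lo + hi) / 2]? with
      | none => rfl
      | some y => by_cases hy : y < x <;> simp [hy, ih]
    · rfl

theorem pvBisectRightGo_eq (a : List Int) (x : Int) :
    ∀ fuel lo hi, pvBisectRightGo a x fuel lo hi = PySem.List.bisectRightLoop a x fuel lo hi := by
  intro fuel
  induction fuel with
  | zero => intro lo hi; simp [pvBisectRightGo, PySem.List.bisectRightLoop]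
  | succ n ih =>
    intro lo hi
    simp only [pvBisectRightGo, PySem.List.bisectRightLoop]
    split_ifs with h
    · cases a[(lo + hi) / 2]? with
      | none => rfl
      | some y => by_cases hy : x < y <;> simp [hy, ih]
    · rfl

theorem pvBisectLeft_eq (a : List Int) (x : Int) : pvBisectLeft a x = PySem.List.bisectLeft a x := by
  simp [pvBisectLeft, PySem.List.bisectLeft, pvBisectLeftGo_eq]

theorem pvBisectRight_eq (a : List Int) (x : Int) : pvBisectRight a x = PySem.List.bisectRight a x := by
  simp [pvBisectRight, PySem.List.bisectRight, pvBisectRightGo_eq]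

-- countP of a prefix-shaped predicate: if p holds exactly at indices < r, countP p = r
theorem countP_eq_of_prefix (p : Int → Bool) :
    ∀ (xs : List Int) (r : Nat), r ≤ xs.length →
      (∀ j (hj : j < xs.length), p xs[j] = true ↔ j < r) → xs.countP p = r := by
  intro xs
  induction xs with
  | nil => intro r hr _; simpa using (Nat.le_zero.mp hr).symm
  | cons y t ih =>
    intro r hr h
    cases r with
    | zero =>
      have hy : p y = false := by
        have := h 0 (by simp)
        simpa using this
      have ht : t.countP p = 0 := by
        refine ih 0 (Nat.zero_le _) ?_
        intro j hj
        have := h (j + 1) (by simpa using Nat.succ_lt_succ hj)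
        simpa using this
      simp [hy, ht]
    | succ r' =>
      have hy : p y = true := by
        have := h 0 (by simp)
        simpa using this
      have ht : t.countP p = r' := by
        refine ih r' (by simpa using Nat.succ_le_succ_iff.mp hr) ?_
        intro j hj
        have := h (j + 1) (by simpa using Nat.succ_lt_succ hj)
        simpa [Nat.succ_lt_succ_iff] using this
      simp [hy, ht]

-- countP (≤ x) = countP (< x) + count x
theorem countP_le_split (x : Int) : ∀ (xs : List Int),
    xs.countP (fun y => decide (y ≤ x)) = xs.countP (fun y => decide (y < x)) + xs.count x := by
  intro xs
  induction xs with
  | nil => simp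
  | cons y t ih =>
    rcases lt_trichotomy y x with h | h | h
    · simp [le_of_lt h, h, ne_of_lt h, ih]
      omega
    · subst h
      simp [ih]
      omega
    · simp [not_le_of_gt h, not_lt_of_gt h, ne_of_gt h, ih]

-- on a sorted list, bisectRight − bisectLeft = count
theorem bisect_gap_eq_count (a : List Int) (x : Int)
    (hp : a.Pairwise (fun u v => u ≤ v)) :
    PySem.List.bisectRight a x - PySem.List.bisectLeft a x = a.count x := by
  obtain ⟨hL1, hL2, hL3⟩ := PySem.List.bisectLeft_spec a x hp
  obtain ⟨hR1, hR2, hR3⟩ := PySem.List.bisectRight_spec a x hp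
  have hcL : a.countP (fun y => decide (y < x)) = PySem.List.bisectLeft a x := by
    refine countP_eq_of_prefix _ a _ hL1 ?_
    intro j hj
    constructor
    · intro hpj
      by_contra hge
      exact absurd (of_decide_eq_true hpj) (not_lt_of_ge (hL3 j hj (Nat.le_of_not_lt hge)))
    · intro hlt; exact decide_eq_true (hL2 j hj hlt)
  have hcR : a.countP (fun y => decide (y ≤ x)) = PySem.List.bisectRight a x := by
    refine countP_eq_of_prefix _ a _ hR1 ?_
    intro j hj
    constructor
    · intro hpj
      by_contra hge
      exact absurd (of_decide_eq_true hpj) (not_le_of_gt (hR3 j hj (Nat.le_of_not_lt hge)))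
    · intro hle; exact decide_eq_true (hR2 j hj hle)
  have := countP_le_split x a
  omega

-- A's inner loop over secondMatch appends i once per j equal to the target.
theorem inner_loop_eq_replicate (s : List Int) (i t : Int) (ans : List Int) :
    s.foldl (fun a j => if t = j then a ++ [i] else a) ans
      = ans ++ List.replicate (s.count t) i := by
  induction s generalizing ans with
  | nil => simp
  | cons j s ih =>
    by_cases h : t = j
    · subst h
      rw [List.foldl_cons, if_pos rfl, ih, List.count_cons_self, List.replicate_succ',
        List.append_assoc, List.singleton_append, ← List.replicate_succ,
        List.replicate_succ']
    · have hne : ¬ (j = t) := fun e => h e.symm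
      simp [List.foldl_cons, h, ih, hne]

-- ===== VERDICT (by name: the statement is the Claim_ definition above) =====
theorem constrainedMatchPair_spec : Claim_equal_constrainedMatchPair := by
  intro f s length _
  unfold Spec_constrainedMatchPair constrainedMatchPair constrainedMatchPair_alt
  by_cases hf : f.length = 0
  · simp [hf]
  · by_cases hs : s.length = 0
    · simp [hf, hs]
    · simp only [hf, hs, if_false]
      have hgap : ∀ t : Int,
          pvBisectRight (PySem.List.sorted s (fun j => j) false) t
            - pvBisectLeft (PySem.List.sorted s (fun j => j) false) t = s.count t := by
        intro t
        rw [pvBisectLeft_eq, pvBisectRight_eq,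
          bisect_gap_eq_count _ _ (PySem.List.sorted_pairwise s (fun j => j)),
          List.Perm.count_eq (PySem.List.sorted_perm s (fun j => j) false)]
      refine PySem.List.foldl_congr_mem f _ _ [] (fun ans i _ => ?_)
      rw [inner_loop_eq_replicate, hgap]
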